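-- pv_equiv track=rewrite | github.com/JZXXX/Span-srl | scripts/configs_gen.py | assign_device
-- ===== SOURCE A (Python) =====
-- from functools import reduce
-- from collections import defaultdict
--
-- def assign_device(gpus, configpathlist):
--     """为每个card分配config file"""
--     gpuslist = reduce(lambda x,y: x+y, map(lambda x:[(x[0], i) for i in x[1]], zip(gpus.keys(), gpus.values()))) # [(11,0) (11,1), ...]
--     n_gpu = len(gpuslist)
--     config_num = len(configpathlist)
--
--     device_dict = {}  # {machine_idx:{card_idx:[configfile,...],  ...}, ...}
--     for machine_idx in gpus:
--         device_dict[machine_idx] = defaultdict(list)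
--     # config_idx: config index waiting for assignment
--     for config_idx, configfile in enumerate(configpathlist):
--         machine_idx, card_idx = gpuslist[config_idx%n_gpu]
--         device_dict[machine_idx][card_idx].append(configfile)
--
--     return device_dict
-- ===== SOURCE B (Python) =====
-- def assign_device(gpus, configpathlist):
--     """Per-machine construction: the card at global slot i gets configpathlist[i::n]."""
--     n = sum(len(cards) for cards in gpus.values())
--     ncfg = len(configpathlist)
--     out = {}
--     slot = 0
--     for m, cards in gpus.items():
--         inner = {}
--         for c in cards:
--             if slot < ncfg:
--                 inner[c] = inner.get(c, []) + configpathlist[slot::n]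
--             slot += 1
--         out[m] = inner
--     return out
-- ===== Notes on version B (the rewrite author's own statement) =====
-- stated objective: faster
-- what changed: A flattens the gpu dict into one slot list by reduce(+) (quadratic concatenation) and then walks the configs, appending each one to the card at slot (index mod n) inside a prefilled dict of defaultdicts; B never builds per-config state: it walks the machines once with a running slot counter and gives each occupied card its whole stride slice configpathlist[slot::n] in one assignment, building each machine's inner dict directly.
import Mathlib
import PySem

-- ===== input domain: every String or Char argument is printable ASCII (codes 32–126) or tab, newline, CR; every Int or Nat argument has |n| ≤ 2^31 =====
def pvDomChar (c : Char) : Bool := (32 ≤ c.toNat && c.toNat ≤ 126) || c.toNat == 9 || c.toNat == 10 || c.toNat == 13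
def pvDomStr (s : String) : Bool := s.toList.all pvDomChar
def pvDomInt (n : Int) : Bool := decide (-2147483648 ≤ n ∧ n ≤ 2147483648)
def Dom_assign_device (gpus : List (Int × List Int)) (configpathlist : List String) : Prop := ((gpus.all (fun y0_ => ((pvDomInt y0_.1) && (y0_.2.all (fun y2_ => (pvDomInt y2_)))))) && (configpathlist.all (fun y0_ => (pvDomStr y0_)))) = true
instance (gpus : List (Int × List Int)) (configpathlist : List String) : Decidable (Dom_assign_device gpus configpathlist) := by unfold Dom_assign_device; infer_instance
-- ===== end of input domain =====

-- B replaces A's global flat slot list + per-config round-robin dict updates by a per-machine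
-- construction: walking the machines once with a running slot counter, the card at global slot i
-- receives the whole stride slice configpathlist[i::n] at once; same return value on Pre_.

-- ===== PORT A =====
def assign_device (gpus : List (Int × List Int)) (configpathlist : List String) : List (Int × List (Int × List String)) :=
  -- reduce(lambda x,y: x+y, map(...)): left fold of ++ (Python raises TypeError on empty gpus: excluded by Pre_)
  let gpuslist : List (Int × Int) :=
    (gpus.map (fun x => x.2.map (fun i => (x.1, i)))).foldl (fun x y => x ++ y) []
  let n_gpu : Int := (gpuslist.length : Int)
  let device_dict0 : PySem.Dict Int (PySem.Dict Int (List String)) :=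
    gpus.foldl (fun d p => d.insert p.1 PySem.Dict.empty) PySem.Dict.empty
  let device_dict :=
    (PySem.List.enumerate configpathlist).foldl
      (fun d p =>
        let mc := PySem.List.pyGetD gpuslist (PySem.Int.mod p.1 n_gpu) (0, 0)
        d.modify mc.1 PySem.Dict.empty (fun inner => inner.modify mc.2 [] (fun l => l ++ [p.2])))
      device_dict0
  device_dict.items.map (fun q => (q.1, q.2.items))

-- ===== PORT B =====
def assign_device_alt (gpus : List (Int × List Int)) (configpathlist : List String) : List (Int × List (Int × List String)) :=
  let n : Int := (gpus.map (fun p => (p.2.length : Int))).sum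
  let ncfg : Int := (configpathlist.length : Int)
  let out :=
    gpus.foldl
      (fun (st : PySem.Dict Int (PySem.Dict Int (List String)) × Int) g =>
        let mi :=
          g.2.foldl
            (fun (q : PySem.Dict Int (List String) × Int) c =>
              if q.2 < ncfg then
                (q.1.insert c (q.1.getD c [] ++
                    (PySem.List.slice? configpathlist (some q.2) none n).getD []), q.2 + 1)
              else (q.1, q.2 + 1))
            (PySem.Dict.empty, st.2)
        (st.1.insert g.1 mi.1, mi.2))
      (PySem.Dict.empty, (0 : Int))
  out.1.items.map (fun q => (q.1, q.2.items))

-- ===== PRECONDITION & SPEC =====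
-- Pre_ excludes: assoc lists with duplicate machine keys or with a duplicate card index inside one
-- machine (a Python dict argument cannot carry duplicate keys, and on a duplicated card A's append
-- order is an accident of its round-robin interleaving), and the inputs on which A raises
-- (empty gpus: TypeError from reduce; no cards at all with a non-empty configpathlist: ZeroDivisionError).
def Pre_assign_device (gpus : List (Int × List Int)) (configpathlist : List String) : Prop :=
  (gpus.map Prod.fst).Nodup ∧ gpus ≠ [] ∧ (∀ p ∈ gpus, p.2.Nodup) ∧
  (configpathlist ≠ [] → ∃ p ∈ gpus, p.2 ≠ [])
instance (gpus : List (Int × List Int)) (configpathlist : List String) : Decidable (Pre_assign_device gpus configpathlist) := by unfold Pre_assign_device; infer_instance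

def pvWitness_assign_device : (List (Int × List Int)) × List String :=
  ([(1, [0, 1]), (2, [0])], ["a", "b", "c", "d"])

def Spec_assign_device (gpus : List (Int × List Int)) (configpathlist : List String) (out : List (Int × List (Int × List String))) : Prop := out = assign_device_alt gpus configpathlist
instance (gpus : List (Int × List Int)) (configpathlist : List String) (out : List (Int × List (Int × List String))) : Decidable (Spec_assign_device gpus configpathlist out) := by unfold Spec_assign_device; infer_instance

-- ===== CLAIM (what is proved, stated in full; the proofs are below) =====
def Claim_equal_assign_device : Prop := ∀ (gpus : List (Int × List Int)) (configpathlist : List String), Dom_assign_device gpus configpathlist → Pre_assign_device gpus configpathlist → Spec_assign_device gpus configpathlist (assign_device gpus configpathlist)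


-- ===== LEMMAS AND PROOFS =====

-- the shared nested-dict state, A's two fold steps, and the per-slot chunk
abbrev PvDD := PySem.Dict Int (PySem.Dict Int (List String))

def pvBig (d : PvDD) (mc : Int × Int) (xs : List String) : PvDD :=
  d.modify mc.1 PySem.Dict.empty (fun inner => inner.modify mc.2 [] (fun l => l ++ xs))

def pvPath (d : PvDD) (mc : Int × Int) : Prop :=
  d.contains mc.1 = true ∧ (d.getD mc.1 PySem.Dict.empty).contains mc.2 = true

def pvChunk (cs : List String) (n : Int) (t : Int) (i : Int) : List String :=
  (PySem.List.pyRange i t n).map (fun j => PySem.List.pyGetD cs j "")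

def pvStepB (cs : List String) (n : Int) (t : Int) (d : PvDD) (p : Int × (Int × Int)) : PvDD :=
  if (pvChunk cs n t p.1).isEmpty then d else pvBig d p.2 (pvChunk cs n t p.1)

def pvStepA (L : List (Int × Int)) (n : Int) (d : PvDD) (p : Int × String) : PvDD :=
  pvBig d (PySem.List.pyGetD L (PySem.Int.mod p.1 n) (0, 0)) [p.2]

-- B's shape: the per-card inner step, the per-machine outer step, and the rows they produce
def pvInnerStep (cs : List String) (n t : Int) (q : PySem.Dict Int (List String) × Int) (c : Int) :
    PySem.Dict Int (List String) × Int :=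
  (if (pvChunk cs n t q.2).isEmpty then q.1 else q.1.modify c [] (fun l => l ++ pvChunk cs n t q.2),
   q.2 + 1)

def pvOuterStep (cs : List String) (n t : Int) (st : PvDD × Int) (g : Int × List Int) : PvDD × Int :=
  let mi := g.2.foldl (pvInnerStep cs n t) (PySem.Dict.empty, st.2)
  (st.1.insert g.1 mi.1, mi.2)

def pvBInnerStep (cs : List String) (n : Int) (q : PySem.Dict Int (List String) × Int) (c : Int) :
    PySem.Dict Int (List String) × Int :=
  if q.2 < (cs.length : Int) then
    (q.1.insert c (q.1.getD c [] ++ (PySem.List.slice? cs (some q.2) none n).getD []), q.2 + 1)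
  else (q.1, q.2 + 1)

def pvBOuterStep (cs : List String) (n : Int) (st : PvDD × Int) (g : Int × List Int) : PvDD × Int :=
  let mi := g.2.foldl (pvBInnerStep cs n) (PySem.Dict.empty, st.2)
  (st.1.insert g.1 mi.1, mi.2)

def pvRows (cs : List String) (n t : Int) :
    List (Int × List Int) → Int → List (Int × PySem.Dict Int (List String))
  | [], _ => []
  | g :: gs, b =>
    (g.1, (g.2.foldl (pvInnerStep cs n t) (PySem.Dict.empty, b)).1)
      :: pvRows cs n t gs (b + g.2.length)

-- ---- enumerate facts ----

lemma pv_enumerate_append {α : Type} (xs ys : List α) (s : Int) :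
    PySem.List.enumerate (xs ++ ys) s
      = PySem.List.enumerate xs s ++ PySem.List.enumerate ys (s + xs.length) := by
  induction xs generalizing s with
  | nil => simp [PySem.List.enumerate]
  | cons x xs ih =>
    simp [PySem.List.enumerate_cons, ih, List.cons_append]
    ring_nf

lemma pv_enumerate_bounds {α : Type} (xs : List α) (s : Int) :
    ∀ p ∈ PySem.List.enumerate xs s, s ≤ p.1 ∧ p.1 < s + xs.length := by
  induction xs generalizing s with
  | nil => simp [PySem.List.enumerate]
  | cons x xs ih =>
    intro p hp
    rw [PySem.List.enumerate_cons] at hp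
    rcases List.mem_cons.mp hp with h | h
    · subst h; constructor <;> simp
    · have := ih (s + 1) p h
      simp at this ⊢
      omega

lemma pv_enumerate_snd_mem {α : Type} (xs : List α) (s : Int) :
    ∀ p ∈ PySem.List.enumerate xs s, p.2 ∈ xs := by
  intro p hp
  have := PySem.List.map_snd_enumerate xs s
  rw [← this]
  exact List.mem_map_of_mem hp

-- ---- dict facts ----

lemma pv_modify_eq {κ ν : Type} [BEq κ] (d : PySem.Dict κ ν) (k : κ) (d0 : ν) (f : ν → ν) :
    d.modify k d0 f = d.insert k (f (d.getD k d0)) := rfl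

lemma pv_insert_comm {κ ν : Type} [BEq κ] [LawfulBEq κ] (d : PySem.Dict κ ν) (k1 k2 : κ)
    (v w : ν) (hne : k1 ≠ k2) (h1 : d.contains k1 = true) :
    (d.insert k1 v).insert k2 w = (d.insert k2 w).insert k1 v := by
  apply PySem.Dict.ext
  by_cases h2 : d.contains k2 = true
  · rw [PySem.Dict.items_insert_of_contains _ w (by rw [PySem.Dict.contains_insert]; simp [h2]),
        PySem.Dict.items_insert_of_contains _ v h1,
        PySem.Dict.items_insert_of_contains _ v (by rw [PySem.Dict.contains_insert]; simp [h1]),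
        PySem.Dict.items_insert_of_contains _ w h2,
        List.map_map, List.map_map]
    apply List.map_congr_left
    intro p _
    simp only [Function.comp]
    by_cases e1 : p.1 = k1
    · simp [e1, hne, beq_iff_eq]
    · by_cases e2 : p.1 = k2 <;> simp [e1, e2, Ne.symm hne, beq_iff_eq]
  · have h2' : d.contains k2 = false := by simpa using h2
    rw [PySem.Dict.items_insert_of_not_contains _ w
          (by rw [PySem.Dict.contains_insert]; simp [h2', Ne.symm hne]),
        PySem.Dict.items_insert_of_contains _ v h1,
        PySem.Dict.items_insert_of_contains _ v
          (by rw [PySem.Dict.contains_insert]; simp [h1]),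
        PySem.Dict.items_insert_of_not_contains _ w h2',
        List.map_append]
    simp [Ne.symm hne]

lemma pv_big_append (d : PvDD) (mc : Int × Int) (xs ys : List String) :
    pvBig d mc (xs ++ ys) = pvBig (pvBig d mc xs) mc ys := by
  simp only [pvBig, pv_modify_eq, PySem.Dict.insert_insert_self, PySem.Dict.getD_insert_self]
  simp [List.append_assoc]

lemma pv_big_comm (d : PvDD) (mc mc' : Int × Int) (xs ys : List String)
    (hne : mc' ≠ mc) (hp : pvPath d mc) :
    pvBig (pvBig d mc xs) mc' ys = pvBig (pvBig d mc' ys) mc xs := by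
  obtain ⟨h1, h2⟩ := hp
  by_cases hm : mc'.1 = mc.1
  · have hc : mc'.2 ≠ mc.2 := by
      intro h; exact hne (Prod.ext hm h)
    simp only [pvBig, pv_modify_eq, hm, PySem.Dict.insert_insert_self,
      PySem.Dict.getD_insert_self]
    congr 1
    rw [PySem.Dict.getD_insert_of_ne _ _ _ hc, PySem.Dict.getD_insert_of_ne _ _ _ (Ne.symm hc)]
    exact pv_insert_comm _ _ _ _ _ (Ne.symm hc) h2
  · simp only [pvBig, pv_modify_eq]
    rw [PySem.Dict.getD_insert_of_ne _ _ _ hm, PySem.Dict.getD_insert_of_ne _ _ _ (Ne.symm hm)]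
    exact pv_insert_comm _ _ _ _ _ (Ne.symm hm) h1

lemma pv_path_big (d : PvDD) (mc : Int × Int) (xs : List String) :
    pvPath (pvBig d mc xs) mc := by
  constructor
  · rw [pvBig, PySem.Dict.contains_modify]; simp
  · rw [pvBig, PySem.Dict.getD_modify_self, PySem.Dict.contains_modify]; simp

lemma pv_path_mono (d : PvDD) (mc mc' : Int × Int) (xs : List String)
    (hp : pvPath d mc) : pvPath (pvBig d mc' xs) mc := by
  obtain ⟨h1, h2⟩ := hp
  constructor
  · rw [pvBig, PySem.Dict.contains_modify]; simp [h1]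
  · by_cases hm : mc.1 = mc'.1
    · rw [pvBig, hm, PySem.Dict.getD_modify_self, PySem.Dict.contains_modify]
      rw [hm] at h2; simp [h2]
    · rw [pvBig, PySem.Dict.getD_modify_of_ne _ _ _ hm]; exact h2

lemma pv_insert_getD_self {κ ν : Type} [BEq κ] [LawfulBEq κ] (d : PySem.Dict κ ν) (k : κ)
    (d0 : ν) (h : d.contains k = true) (hnd : d.keys.Nodup) :
    d.insert k (d.getD k d0) = d := by
  apply PySem.Dict.ext
  rw [PySem.Dict.items_insert_of_contains _ _ h]
  refine (List.map_congr_left ?_).trans (List.map_id _)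
  intro p hp
  by_cases e : p.1 = k
  · have hm : (k, p.2) ∈ d.items := by rw [← e]; exact hp
    rw [if_pos (by simp [e] : (p.1 == k) = true),
      PySem.Dict.getD_of_mem_items d hm hnd d0, ← e]
    rfl
  · simp [e, beq_iff_eq]

lemma pv_keys_insert_of_contains {κ ν : Type} [BEq κ] [LawfulBEq κ] (d : PySem.Dict κ ν)
    (k : κ) (v : ν) (h : d.contains k = true) : (d.insert k v).keys = d.keys := by
  simp only [PySem.Dict.keys, PySem.Dict.items_insert_of_contains _ _ h, List.map_map]
  apply List.map_congr_left
  intro p _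
  by_cases e : p.1 = k <;> simp [e, beq_iff_eq, Function.comp]

-- ---- pyRange with positive step: behaviour at the stop bound ----

lemma pv_toNat_div (m k : Nat) : (((m : Int)) / (k : Int)).toNat = m / k := by
  exact Nat.add_zero (m.div k)

lemma pv_pyRange_succ (n t : Nat) (hn : 0 < n) (a : Nat) (ha : a < n) :
    PySem.List.pyRange (a : Int) ((t : Int) + 1) (n : Int)
      = PySem.List.pyRange (a : Int) (t : Int) (n : Int)
        ++ (if t % n = a then [(t : Int)] else []) := by
  have hn' : (0 : Int) < (n : Int) := by exact_mod_cast hn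
  rw [PySem.List.pyRange_of_pos _ _ hn', PySem.List.pyRange_of_pos _ _ hn']
  rcases Nat.lt_trichotomy t a with hta | hta | hta
  · -- t < a : everything empty
    have c2 : ¬ ((a : Int) < (t : Int) + 1) := by omega
    have c1 : ¬ ((a : Int) < (t : Int)) := by omega
    have hm : ¬ (t % n = a) := by have := Nat.mod_le t n; omega
    simp [c1, c2, hm]
  · -- t = a
    subst hta
    have c2 : (t : Int) < (t : Int) + 1 := by omega
    have c1 : ¬ ((t : Int) < (t : Int)) := by omega
    have harg : (t : Int) + 1 - t + n - 1 = ((n : Nat) : Int) := by omega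
    have hm : t % n = t := Nat.mod_eq_of_lt ha
    rw [if_pos c2, if_neg c1, harg, pv_toNat_div, Nat.div_self hn, if_pos hm]
    simp [List.range_succ]
  · -- a < t
    have c2 : (a : Int) < (t : Int) + 1 := by omega
    have c1 : (a : Int) < (t : Int) := by exact_mod_cast hta
    obtain ⟨q, r, hd, hr⟩ : ∃ q r, t - a = n * q + r ∧ r < n :=
      ⟨(t - a) / n, (t - a) % n, (Nat.div_add_mod _ _).symm, Nat.mod_lt _ hn⟩
    have harg2 : (t : Int) + 1 - a + n - 1 = ((n * q + r + n : Nat) : Int) := by push_cast; omega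
    have harg1 : (t : Int) - a + n - 1 = ((n * q + (r + n - 1) : Nat) : Int) := by push_cast; omega
    have hc2 : (n * q + r + n) / n = q + 1 := by
      rw [Nat.add_div_right _ hn, Nat.mul_add_div hn, Nat.div_eq_of_lt hr]
    rcases Nat.eq_zero_or_pos r with hr0 | hr1
    · -- r = 0 : the count grows by one and t % n = a
      subst hr0
      have hc1 : (n * q + (0 + n - 1)) / n = q := by
        rw [Nat.mul_add_div hn, Nat.div_eq_of_lt (by omega)]
        omega
      have hm : t % n = a := by
        have et : t = a + n * q := by omega
        rw [et, Nat.add_mul_mod_self_left, Nat.mod_eq_of_lt ha]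
      rw [if_pos c2, if_pos c1, harg2, harg1, pv_toNat_div, pv_toNat_div, hc2, hc1,
        if_pos hm, List.range_succ, List.map_append]
      congr 1
      simp only [List.map_cons, List.map_nil, List.cons.injEq, and_true]
      omega
    · -- r ≥ 1 : the count is unchanged and t % n ≠ a
      have hc1 : (n * q + (r + n - 1)) / n = q + 1 := by
        have e2 : (r + n - 1) / n = 1 := by
          apply Nat.div_eq_of_lt_le <;> omega
        rw [Nat.mul_add_div hn, e2]
      have hm : ¬ (t % n = a) := by
        have et : t = (a + r) + n * q := by omega
        rw [et, Nat.add_mul_mod_self_left]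
        rcases Nat.lt_or_ge (a + r) n with h | h
        · rw [Nat.mod_eq_of_lt h]; omega
        · rw [Nat.mod_eq_sub_mod h, Nat.mod_eq_of_lt (by omega)]; omega
      rw [if_pos c2, if_pos c1, harg2, harg1, pv_toNat_div, pv_toNat_div, hc2, hc1, if_neg hm,
        List.append_nil]

lemma pv_pyRange_pos_empty (n : Int) (hn : 0 < n) (a b : Int) (h : ¬ (a < b)) :
    PySem.List.pyRange a b n = [] := by
  rw [PySem.List.pyRange_of_pos _ _ hn]
  simp [h]

-- ---- chunk bookkeeping ----

lemma pv_chunk_empty (cs : List String) (n : Int) (hn : 0 < n) (t i : Int) (h : ¬ (i < t)) :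
    pvChunk cs n t i = [] := by
  rw [pvChunk, pv_pyRange_pos_empty n hn i t h]; rfl

lemma pv_chunk_nonempty (cs : List String) (n : Int) (hn : 0 < n) (t i : Int) (h : i < t) :
    (pvChunk cs n t i).isEmpty = false := by
  rw [pvChunk, PySem.List.pyRange_of_pos _ _ hn]
  have : ((t - i + n - 1) / n).toNat ≠ 0 := by
    have h1 : (1 : Int) ≤ (t - i + n - 1) / n := by
      rw [Int.le_ediv_iff_mul_le hn]; omega
    omega
  simp [h, List.isEmpty_eq_false_iff, List.range_eq_nil, this]

lemma pv_chunk_succ_ne (cs : List String) (n : Nat) (hn : 0 < n) (t : Nat) (i : Int)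
    (h0 : 0 ≤ i) (hlt : i < (n : Int)) (hne : i ≠ ((t % n : Nat) : Int)) :
    pvChunk cs (n : Int) ((t : Int) + 1) i = pvChunk cs (n : Int) (t : Int) i := by
  have hi : i = ((i.toNat : Nat) : Int) := (Int.toNat_of_nonneg h0).symm
  rw [pvChunk, pvChunk, hi,
    pv_pyRange_succ n t hn i.toNat (by omega),
    if_neg (by intro h; apply hne; rw [hi, h]),
    List.append_nil]

lemma pv_chunk_succ_eq (cs : List String) (n : Nat) (hn : 0 < n) (t : Nat) (ht : t < cs.length) :
    pvChunk cs (n : Int) ((t : Int) + 1) ((t % n : Nat) : Int)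
      = pvChunk cs (n : Int) (t : Int) ((t % n : Nat) : Int) ++ [cs[t]] := by
  rw [pvChunk, pvChunk, pv_pyRange_succ n t hn (t % n) (Nat.mod_lt _ hn), if_pos rfl,
    List.map_append]
  simp [PySem.List.pyGetD_natCast, List.getElem?_eq_getElem ht]

-- the stride slice configpathlist[i::n] IS the chunk at slot i (0 ≤ i, 0 < n)
lemma pv_slice_chunk (cs : List String) (n i : Int) (hn : 0 < n) (h0 : 0 ≤ i) :
    (PySem.List.slice? cs (some i) none n).getD [] = pvChunk cs n (cs.length : Int) i := by
  have hn0 : n ≠ 0 := by omega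
  have hnneg : ¬ (n < 0) := by omega
  rw [pvChunk, PySem.List.pyRange_of_pos _ _ hn]
  simp only [PySem.List.slice?, PySem.List.sliceIndices, if_neg hn0, if_neg hnneg,
    if_neg (by omega : ¬ i < 0), if_pos hn, Option.getD_some]
  by_cases hlt : i < (cs.length : Int)
  · have hmin : min i (cs.length : Int) = i := min_eq_left (le_of_lt hlt)
    rw [hmin]
    simp only [if_pos hlt, List.map_map]
    apply List.filterMap_eq_map_iff_forall_eq_some.mpr
    intro k hk
    have hkc : (k : Int) < ((cs.length : Int) - i + n - 1) / n := by
      have := List.mem_range.mp hk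
      omega
    have hub : i + n * (k : Int) < (cs.length : Int) := by
      have h1 : ((cs.length : Int) - i + n - 1) / n * n ≤ (cs.length : Int) - i + n - 1 :=
        Int.ediv_mul_le _ hn0
      nlinarith [hkc, hn]
    have hlb : 0 ≤ i + n * (k : Int) :=
      add_nonneg h0 (mul_nonneg hn.le (Int.natCast_nonneg k))
    have hidx : (i + n * (k : Int)).toNat < cs.length := by omega
    rw [List.getElem?_eq_getElem hidx]
    simp only [Function.comp]
    rw [PySem.List.pyGetD_eq_getElem cs "" hlb (by exact_mod_cast hub)]
  · have hmin : min i (cs.length : Int) = (cs.length : Int) := min_eq_right (by omega)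
    rw [hmin, if_neg (by omega), if_neg hlt]
    rfl

-- ---- fold bookkeeping for A's stride form ----

lemma pv_fold_congr (cs : List String) (n : Int) (t t' : Int)
    (l : List (Int × (Int × Int))) (d : PvDD)
    (h : ∀ p ∈ l, pvChunk cs n t p.1 = pvChunk cs n t' p.1) :
    l.foldl (pvStepB cs n t) d = l.foldl (pvStepB cs n t') d := by
  apply PySem.List.foldl_congr_mem
  intro acc p hp
  rw [pvStepB, pvStepB, h p hp]

lemma pv_foldl_skip (cs : List String) (n : Int) (t : Int)
    (l : List (Int × (Int × Int))) (d : PvDD)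
    (h : ∀ p ∈ l, (pvChunk cs n t p.1).isEmpty) :
    l.foldl (pvStepB cs n t) d = d := by
  induction l generalizing d with
  | nil => rfl
  | cons p l ih =>
    rw [List.foldl_cons, pvStepB, if_pos (h p (List.mem_cons_self ..))]
    exact ih _ (fun q hq => h q (List.mem_cons_of_mem _ hq))

-- move a single pending append past later slots (distinct cards, path already present)
lemma pv_fold_comm (cs : List String) (n : Int) (t : Int) (mc : Int × Int) (x : String)
    (l : List (Int × (Int × Int))) (d : PvDD)
    (hne : ∀ p ∈ l, p.2 ≠ mc) (hp : pvPath d mc) :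
    l.foldl (pvStepB cs n t) (pvBig d mc [x]) = pvBig (l.foldl (pvStepB cs n t) d) mc [x] := by
  induction l generalizing d with
  | nil => rfl
  | cons p l ih =>
    simp only [List.foldl_cons]
    have hpne : p.2 ≠ mc := hne p (List.mem_cons_self ..)
    have hstep : pvStepB cs n t (pvBig d mc [x]) p = pvBig (pvStepB cs n t d p) mc [x] := by
      rw [pvStepB, pvStepB]
      by_cases hg : (pvChunk cs n t p.1).isEmpty
      · rw [if_pos hg, if_pos hg]
      · rw [if_neg hg, if_neg hg, pv_big_comm d mc p.2 [x] _ hpne hp]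
    rw [hstep]
    exact ih _ (fun q hq => hne q (List.mem_cons_of_mem _ hq))
      (by rw [pvStepB]; by_cases hg : (pvChunk cs n t p.1).isEmpty
          · rw [if_pos hg]; exact hp
          · rw [if_neg hg]; exact pv_path_mono _ _ _ _ hp)

-- ---- the main induction: A's first t configs  =  the stride fold with the chunks cut at t ----

lemma pv_main (L : List (Int × Int)) (cs : List String) (hL : L ≠ []) (hnd : L.Nodup)
    (t : Nat) (ht : t ≤ cs.length) (d0 : PvDD) :
    (PySem.List.enumerate (cs.take t)).foldl (pvStepA L (L.length : Int)) d0
      = (PySem.List.enumerate L).foldl (pvStepB cs (L.length : Int) (t : Int)) d0 := by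
  have hN : 0 < L.length := List.length_pos_iff.mpr hL
  have hN' : (0 : Int) < (L.length : Int) := by exact_mod_cast hN
  induction t generalizing d0 with
  | zero =>
    simp only [List.take_zero, Nat.cast_zero]
    rw [show PySem.List.enumerate ([] : List String) = [] from rfl, List.foldl_nil]
    rw [pv_foldl_skip]
    intro p hp
    have hb := pv_enumerate_bounds L 0 p hp
    rw [pv_chunk_empty cs _ hN' 0 p.1 (by omega)]
    rfl
  | succ t ih =>
    have htlt : t < cs.length := by omega
    set N := L.length with hNdef
    set q := t % N with hqdef
    have hq : q < N := Nat.mod_lt _ hN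
    have hql : q ≤ t := Nat.mod_le _ _
    -- LHS: peel off config t
    have htake : cs.take (t + 1) = cs.take t ++ [cs[t]] := by
      rw [List.take_add_one, List.getElem?_eq_getElem htlt]; rfl
    rw [htake, pv_enumerate_append, List.foldl_append, ih (by omega)]
    have hlen : ((cs.take t).length : Int) = (t : Int) := by
      simp [List.length_take, Nat.min_eq_left (le_of_lt htlt)]
    rw [show PySem.List.enumerate [cs[t]] (0 + ((cs.take t).length : Int))
          = [(((cs.take t).length : Int), cs[t])] from by
        rw [PySem.List.enumerate_cons]; simp [PySem.List.enumerate],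
      hlen]
    rw [List.foldl_cons, List.foldl_nil]
    -- the A-step is a single pvBig at slot q
    have hmod : PySem.Int.mod (t : Int) (N : Int) = ((q : Nat) : Int) := by
      rw [hqdef]; exact_mod_cast PySem.Int.mod_natCast t N
    have hstepA : pvStepA L (N : Int) ((PySem.List.enumerate L).foldl (pvStepB cs (N : Int) (t : Int)) d0) ((t : Int), cs[t])
        = pvBig ((PySem.List.enumerate L).foldl (pvStepB cs (N : Int) (t : Int)) d0) L[q] [cs[t]] := by
      rw [pvStepA, hmod, PySem.List.pyGetD_natCast, List.getD_eq_getElem _ _ hq]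
    rw [hstepA]
    -- RHS: split the slot list at q
    have hsplit : L = L.take q ++ L[q] :: L.drop (q + 1) := by
      rw [← List.drop_eq_getElem_cons hq, List.take_append_drop]
    have hlenq : ((L.take q).length : Int) = (q : Int) := by
      have : (L.take q).length = q := by
        rw [List.length_take]; omega
      rw [this]
    have henum : PySem.List.enumerate L 0
        = PySem.List.enumerate (L.take q) 0
          ++ (((q : Nat) : Int), L[q]) :: PySem.List.enumerate (L.drop (q + 1)) ((q : Int) + 1) := by
      conv_lhs => rw [hsplit]
      rw [pv_enumerate_append, hlenq, PySem.List.enumerate_cons]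
      simp
    have hcast : ((t : Nat) : Int) + 1 = (((t + 1 : Nat)) : Int) := by push_cast; ring
    rw [← hcast] at *
    -- the prefix and suffix slots keep their chunks
    have hpre : ∀ s, (PySem.List.enumerate (L.take q) 0).foldl (pvStepB cs (N : Int) ((t : Int) + 1)) s
        = (PySem.List.enumerate (L.take q) 0).foldl (pvStepB cs (N : Int) (t : Int)) s := by
      intro s
      apply pv_fold_congr
      intro p hp
      have hb := pv_enumerate_bounds (L.take q) 0 p hp
      rw [hlenq] at hb
      exact pv_chunk_succ_ne cs N hN t p.1 (by omega)
        (by exact_mod_cast (by omega : p.1 < (q : Int)).trans_le (by exact_mod_cast le_of_lt hq))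
        (by omega)
    have hsuf : ∀ s, (PySem.List.enumerate (L.drop (q + 1)) ((q : Int) + 1)).foldl (pvStepB cs (N : Int) ((t : Int) + 1)) s
        = (PySem.List.enumerate (L.drop (q + 1)) ((q : Int) + 1)).foldl (pvStepB cs (N : Int) (t : Int)) s := by
      intro s
      apply pv_fold_congr
      intro p hp
      have hb := pv_enumerate_bounds (L.drop (q + 1)) ((q : Int) + 1) p hp
      have hdl : (L.drop (q + 1)).length = N - (q + 1) := by simp [hNdef]
      rw [hdl] at hb
      apply pv_chunk_succ_ne cs N hN t p.1 (by omega) (by omega) (by omega)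
    have hmem : ∀ p ∈ PySem.List.enumerate (L.drop (q + 1)) ((q : Int) + 1), p.2 ≠ L[q] := by
      intro p hp hpq
      have hmem2 := pv_enumerate_snd_mem _ _ p hp
      have : L[q] ∉ L.drop (q + 1) := by
        have h2 := hnd
        rw [hsplit] at h2
        have h3 := (List.nodup_append.mp h2).2.1
        exact (List.nodup_cons.mp h3).1
      rw [hpq] at hmem2
      exact this hmem2
    rw [henum, List.foldl_append, List.foldl_append, List.foldl_cons, List.foldl_cons, hpre d0]
    set X := (PySem.List.enumerate (L.take q) 0).foldl (pvStepB cs (N : Int) (t : Int)) d0 with hX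
    by_cases hce : q < t
    · -- the chunk at slot q is nonempty: commute the single append past the suffix
      have hne : (pvChunk cs (N : Int) (t : Int) ((q : Nat) : Int)).isEmpty = false :=
        pv_chunk_nonempty cs _ hN' _ _ (by exact_mod_cast hce)
      have hmid : pvStepB cs (N : Int) ((t : Int) + 1) X (((q : Nat) : Int), L[q])
          = pvBig (pvStepB cs (N : Int) (t : Int) X (((q : Nat) : Int), L[q])) L[q] [cs[t]] := by
        rw [pvStepB, pvStepB, pv_chunk_succ_eq cs N hN t htlt, ← hqdef,
          if_neg (by simp), if_neg (by simp [hne])]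
        exact pv_big_append _ _ _ _
      rw [hmid, hsuf, pv_fold_comm _ _ _ _ _ _ _ hmem]
      rw [pvStepB, if_neg (by simp [hne])]
      exact pv_path_big _ _ _
    · -- q = t < N: all suffix slots (and slot q at time t) are skips
      have hce2 : (pvChunk cs (N : Int) (t : Int) ((q : Nat) : Int)).isEmpty = true := by
        rw [pv_chunk_empty cs _ hN' _ _ (by exact_mod_cast hce)]; rfl
      have hskip : ∀ p ∈ PySem.List.enumerate (L.drop (q + 1)) ((q : Int) + 1),
          (pvChunk cs (N : Int) (t : Int) p.1).isEmpty := by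
        intro p hp
        have hb := pv_enumerate_bounds (L.drop (q + 1)) ((q : Int) + 1) p hp
        rw [pv_chunk_empty cs _ hN' _ _ (by omega)]; rfl
      have hmid : pvStepB cs (N : Int) ((t : Int) + 1) X (((q : Nat) : Int), L[q])
          = pvBig X L[q] [cs[t]] := by
        rw [pvStepB, pv_chunk_succ_eq cs N hN t htlt]
        rw [pv_chunk_empty cs _ hN' _ _ (by exact_mod_cast hce)]
        simp
      rw [hmid, hsuf, pv_foldl_skip _ _ _ _ _ hskip, pvStepB, if_pos hce2,
        pv_foldl_skip _ _ _ _ _ hskip]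

-- ---- from the stride fold to B's per-machine shape ----

lemma pv_inner_snd (cs : List String) (n t : Int) (cards : List Int)
    (q : PySem.Dict Int (List String) × Int) :
    (cards.foldl (pvInnerStep cs n t) q).2 = q.2 + cards.length := by
  induction cards generalizing q with
  | nil => simp
  | cons c cards ih =>
    rw [List.foldl_cons, ih]
    simp [pvInnerStep]
    omega

-- one machine's contiguous slot segment folds into a single overwrite of that machine's entry
lemma pv_seg (cs : List String) (n t : Int) (m : Int) (cards : List Int) :
    ∀ (d : PvDD) (b : Int), d.keys.Nodup → d.contains m = true →
    (PySem.List.enumerate (cards.map (fun c => (m, c))) b).foldl (pvStepB cs n t) d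
      = d.insert m (cards.foldl (pvInnerStep cs n t) (d.getD m PySem.Dict.empty, b)).1 := by
  induction cards with
  | nil =>
    intro d b hnd hc
    simp only [List.map_nil, List.foldl_nil]
    rw [show PySem.List.enumerate ([] : List (Int × Int)) b = [] from rfl, List.foldl_nil,
      pv_insert_getD_self d m _ hc hnd]
  | cons c cards ih =>
    intro d b hnd hc
    rw [List.map_cons, PySem.List.enumerate_cons, List.foldl_cons, List.foldl_cons]
    by_cases hg : (pvChunk cs n t b).isEmpty
    · rw [show pvStepB cs n t d (b, (m, c)) = d from by rw [pvStepB, if_pos hg],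
        ih d (b + 1) hnd hc,
        show pvInnerStep cs n t (d.getD m PySem.Dict.empty, b) c
          = (d.getD m PySem.Dict.empty, b + 1) from by simp [pvInnerStep, hg]]
    · have hstep : pvStepB cs n t d (b, (m, c))
          = d.insert m ((d.getD m PySem.Dict.empty).modify c [] (fun l => l ++ pvChunk cs n t b)) := by
        rw [pvStepB, if_neg hg]; rfl
      rw [hstep, ih _ (b + 1) (by rw [pv_keys_insert_of_contains _ _ _ hc]; exact hnd)
          (by rw [PySem.Dict.contains_insert]; simp),
        PySem.Dict.getD_insert_self, PySem.Dict.insert_insert_self,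
        show pvInnerStep cs n t (d.getD m PySem.Dict.empty, b) c
          = ((d.getD m PySem.Dict.empty).modify c [] (fun l => l ++ pvChunk cs n t b), b + 1) from by
            simp [pvInnerStep, hg]]

lemma pv_outer (cs : List String) (n t : Int) :
    ∀ (gs : List (Int × List Int)) (d : PvDD) (b : Int),
    (gs.map Prod.fst).Nodup → d.keys.Nodup →
    (∀ g ∈ gs, d.contains g.1 = true ∧ d.getD g.1 PySem.Dict.empty = PySem.Dict.empty) →
    (PySem.List.enumerate (gs.flatMap (fun p => p.2.map (fun c => (p.1, c)))) b).foldl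
        (pvStepB cs n t) d
      = (gs.foldl (pvOuterStep cs n t) (d, b)).1 := by
  intro gs
  induction gs with
  | nil =>
    intro d b _ _ _
    rw [List.flatMap_nil, show PySem.List.enumerate ([] : List (Int × Int)) b = [] from rfl]
    rfl
  | cons g gs ih =>
    intro d b hgnd hnd hok
    obtain ⟨hc, hemp⟩ := hok g (List.mem_cons_self ..)
    rw [List.flatMap_cons, pv_enumerate_append, List.foldl_append,
      pv_seg cs n t g.1 g.2 d b hnd hc, hemp, List.foldl_cons]
    have hg1 : g.1 ∉ gs.map Prod.fst := by
      rw [List.map_cons, List.nodup_cons] at hgnd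
      exact hgnd.1
    have hlen : b + ((g.2.map (fun c => (g.1, c))).length : Int) = b + (g.2.length : Int) := by
      simp
    rw [hlen]
    have hrhs : pvOuterStep cs n t (d, b) g
        = (d.insert g.1 (g.2.foldl (pvInnerStep cs n t) (PySem.Dict.empty, b)).1,
           b + (g.2.length : Int)) := by
      rw [pvOuterStep]
      simp only []
      rw [pv_inner_snd]
    rw [hrhs]
    apply ih
    · rw [List.map_cons, List.nodup_cons] at hgnd; exact hgnd.2
    · rw [pv_keys_insert_of_contains _ _ _ hc]; exact hnd
    · intro g' hg'
      have hne : g'.1 ≠ g.1 := by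
        intro h
        exact hg1 (h ▸ List.mem_map_of_mem hg')
      obtain ⟨hc', hemp'⟩ := hok g' (List.mem_cons_of_mem _ hg')
      constructor
      · rw [PySem.Dict.contains_insert]; simp [hc']
      · rw [PySem.Dict.getD_insert_of_ne _ _ _ hne]; exact hemp'

-- the items produced by the outer fold, starting from the pre-filled dict (A's path) …
lemma pv_fold_items_over (cs : List String) (n t : Int) :
    ∀ (gs : List (Int × List Int)) (pre : List (Int × PySem.Dict Int (List String)))
      (d : PvDD) (b : Int),
    d.items = pre ++ gs.map (fun g => (g.1, PySem.Dict.empty)) →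
    (d.items.map Prod.fst).Nodup →
    (gs.foldl (pvOuterStep cs n t) (d, b)).1.items = pre ++ pvRows cs n t gs b := by
  intro gs
  induction gs with
  | nil =>
    intro pre d b hitems _
    simpa [pvRows] using hitems
  | cons g gs ih =>
    intro pre d b hitems hnd
    rw [List.foldl_cons]
    have hmem : (g.1, (PySem.Dict.empty : PySem.Dict Int (List String))) ∈ d.items := by
      rw [hitems]; simp
    have hc : d.contains g.1 = true := by
      rw [PySem.Dict.contains_iff_mem_keys]
      exact List.mem_map_of_mem hmem
    have hstep : pvOuterStep cs n t (d, b) g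
        = (d.insert g.1 (g.2.foldl (pvInnerStep cs n t) (PySem.Dict.empty, b)).1,
           b + (g.2.length : Int)) := by
      rw [pvOuterStep]
      simp only []
      rw [pv_inner_snd]
    rw [hstep]
    set v := (g.2.foldl (pvInnerStep cs n t) (PySem.Dict.empty, b)).1 with hv
    have hnd2 := hnd
    rw [hitems] at hnd2
    simp only [List.map_append, List.map_cons, List.map_map, List.nodup_append,
      List.nodup_cons, List.mem_map, Function.comp] at hnd2
    have hg1pre : g.1 ∉ pre.map Prod.fst := by
      intro hmem'
      obtain ⟨p, hp, hpf⟩ := List.mem_map.mp hmem'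
      exact hnd2.2.2 g.1 ⟨p, hp, hpf⟩ g.1 (List.mem_cons_self ..) rfl
    have hg1gs : ∀ g' ∈ gs, g'.1 ≠ g.1 := by
      intro g' hg' h
      exact hnd2.2.1.1 ⟨g', hg', h⟩
    have hmapgs : (gs.map (fun g => ((g.1 : Int), (PySem.Dict.empty : PySem.Dict Int (List String))))).map
        (fun p => if (p.1 == g.1) = true then (g.1, v) else p)
        = gs.map (fun g => (g.1, PySem.Dict.empty)) := by
      rw [List.map_map]
      apply List.map_congr_left
      intro g' hg'
      simp [Function.comp, beq_iff_eq, hg1gs g' hg']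
    have hmappre : pre.map (fun p => if (p.1 == g.1) = true then (g.1, v) else p) = pre := by
      refine (List.map_congr_left ?_).trans (List.map_id _)
      intro p hp
      have : p.1 ≠ g.1 := by
        intro h
        exact hg1pre (h ▸ List.mem_map_of_mem hp)
      simp [this, beq_iff_eq]
    have hitems' : (d.insert g.1 v).items
        = (pre ++ [(g.1, v)]) ++ gs.map (fun g => (g.1, PySem.Dict.empty)) := by
      rw [PySem.Dict.items_insert_of_contains _ _ hc, hitems]
      simp only [List.map_append, List.map_cons, hmappre, hmapgs]
      simp
    have hnd' : ((d.insert g.1 v).items.map Prod.fst).Nodup := by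
      have heq : (d.insert g.1 v).items.map Prod.fst = d.items.map Prod.fst := by
        rw [PySem.Dict.items_insert_of_contains _ _ hc, List.map_map]
        apply List.map_congr_left
        intro p _
        by_cases e : p.1 = g.1 <;> simp [e, beq_iff_eq, Function.comp]
      rw [heq]; exact hnd
    rw [ih (pre ++ [(g.1, v)]) _ _ hitems' hnd', pvRows]
    simp [hv]

-- … and starting from the empty dict (B's path)
lemma pv_fold_items_fresh (cs : List String) (n t : Int) :
    ∀ (gs : List (Int × List Int)) (d : PvDD) (b : Int),
    (gs.map Prod.fst).Nodup →
    (∀ g ∈ gs, d.contains g.1 = false) →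
    (gs.foldl (pvOuterStep cs n t) (d, b)).1.items = d.items ++ pvRows cs n t gs b := by
  intro gs
  induction gs with
  | nil =>
    intro d b _ _
    simp [pvRows]
  | cons g gs ih =>
    intro d b hgnd hfresh
    rw [List.foldl_cons]
    have hstep : pvOuterStep cs n t (d, b) g
        = (d.insert g.1 (g.2.foldl (pvInnerStep cs n t) (PySem.Dict.empty, b)).1,
           b + (g.2.length : Int)) := by
      rw [pvOuterStep]
      simp only []
      rw [pv_inner_snd]
    rw [hstep]
    set v := (g.2.foldl (pvInnerStep cs n t) (PySem.Dict.empty, b)).1 with hv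
    rw [List.map_cons, List.nodup_cons] at hgnd
    rw [ih _ _ hgnd.2 (fun g' hg' => by
        rw [PySem.Dict.contains_insert]
        have hne : g'.1 ≠ g.1 := by
          intro h
          exact hgnd.1 (h ▸ List.mem_map_of_mem hg')
        simp [hne, hfresh g' (List.mem_cons_of_mem _ hg')]),
      PySem.Dict.items_insert_of_not_contains _ _ (hfresh g (List.mem_cons_self ..)), pvRows]
    simp [hv]

-- B's literal steps coincide with the chunk form (nonnegative slot counter, at least one slot)
lemma pv_Binner_eq (cs : List String) (n : Int) (hn : 0 < n) (cards : List Int) :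
    ∀ (inn : PySem.Dict Int (List String)) (b : Int), 0 ≤ b →
    cards.foldl (pvBInnerStep cs n) (inn, b)
      = cards.foldl (pvInnerStep cs n (cs.length : Int)) (inn, b) := by
  induction cards with
  | nil => intro inn b _; rfl
  | cons c cards ih =>
    intro inn b hb
    rw [List.foldl_cons, List.foldl_cons]
    by_cases hlt : b < (cs.length : Int)
    · rw [show pvBInnerStep cs n (inn, b) c
          = (inn.insert c (inn.getD c [] ++ (PySem.List.slice? cs (some b) none n).getD []), b + 1)
          from by rw [pvBInnerStep, if_pos hlt],
        show pvInnerStep cs n (cs.length : Int) (inn, b) c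
          = (inn.modify c [] (fun l => l ++ pvChunk cs n (cs.length : Int) b), b + 1) from by
          simp [pvInnerStep, pv_chunk_nonempty cs n hn _ _ hlt],
        pv_slice_chunk cs n b hn hb, pv_modify_eq]
      exact ih _ _ (by omega)
    · rw [show pvBInnerStep cs n (inn, b) c = (inn, b + 1) from by rw [pvBInnerStep, if_neg hlt],
        show pvInnerStep cs n (cs.length : Int) (inn, b) c = (inn, b + 1) from by
          simp [pvInnerStep, pv_chunk_empty cs n hn _ _ hlt]]
      exact ih _ _ (by omega)

lemma pv_Bouter_eq (cs : List String) (n : Int) (hn : 0 < n) (gs : List (Int × List Int)) :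
    ∀ (d : PvDD) (b : Int), 0 ≤ b →
    gs.foldl (pvBOuterStep cs n) (d, b) = gs.foldl (pvOuterStep cs n (cs.length : Int)) (d, b) := by
  induction gs with
  | nil => intro d b _; rfl
  | cons g gs ih =>
    intro d b hb
    rw [List.foldl_cons, List.foldl_cons]
    have hmi : pvBOuterStep cs n (d, b) g = pvOuterStep cs n (cs.length : Int) (d, b) g := by
      rw [pvBOuterStep, pvOuterStep]
      simp only []
      rw [pv_Binner_eq cs n hn g.2 PySem.Dict.empty b hb]
    rw [hmi]
    have hsnd : (pvOuterStep cs n (cs.length : Int) (d, b) g).2 = b + (g.2.length : Int) := by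
      rw [pvOuterStep]
      simp only []
      rw [pv_inner_snd]
    have := ih (pvOuterStep cs n (cs.length : Int) (d, b) g).1
      (pvOuterStep cs n (cs.length : Int) (d, b) g).2 (by rw [hsnd]; positivity)
    simpa using this

-- the flat slot list has no duplicate (machine, card) pair under Pre_
lemma pv_gpuslist_nodup (gpus : List (Int × List Int))
    (hk : (gpus.map Prod.fst).Nodup) (hc : ∀ p ∈ gpus, p.2.Nodup) :
    (gpus.flatMap (fun p => p.2.map (fun c => (p.1, c)))).Nodup := by
  induction gpus with
  | nil => simp
  | cons p gs ih =>
    rw [List.flatMap_cons, List.nodup_append]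
    rw [List.map_cons, List.nodup_cons] at hk
    refine ⟨?_, ih hk.2 (fun q hq => hc q (List.mem_cons_of_mem _ hq)), ?_⟩
    · exact (hc p (List.mem_cons_self ..)).map (fun a b h => by simpa using h)
    · intro a ha b hb hab
      obtain ⟨c, _, hac⟩ := List.mem_map.mp ha
      obtain ⟨g, hg, hag⟩ := List.mem_flatMap.mp hb
      obtain ⟨c', _, hac'⟩ := List.mem_map.mp hag
      apply hk.1
      rw [List.mem_map]
      refine ⟨g, hg, ?_⟩
      have h1 : a.1 = p.1 := by rw [← hac]
      have h2 : b.1 = g.1 := by rw [← hac']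
      rw [← h2, ← hab, h1]

lemma pv_rows_nil_cards (cs : List String) (n t : Int) :
    ∀ (gs : List (Int × List Int)) (b : Int), (∀ g ∈ gs, g.2 = []) →
    pvRows cs n t gs b = gs.map (fun g => (g.1, PySem.Dict.empty)) := by
  intro gs
  induction gs with
  | nil => intro b _; rfl
  | cons g gs ih =>
    intro b hnil
    rw [pvRows, hnil g (List.mem_cons_self ..)]
    simp only [List.foldl_nil, List.length_nil, List.map_cons]
    rw [ih _ (fun g' hg' => hnil g' (List.mem_cons_of_mem _ hg'))]

-- ===== VERDICT (by name: the statements are the Claim_ definitions above) =====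
theorem assign_device_spec : Claim_equal_assign_device := by
  intro gpus cs _ hpre
  obtain ⟨hkeys, hgne, hcards, hcfg⟩ := hpre
  unfold Spec_assign_device
  simp only [assign_device, assign_device_alt]
  have hg : (gpus.map (fun x => x.2.map (fun i => (x.1, i)))).foldl (fun x y => x ++ y) ([] : List (Int × Int))
      = gpus.flatMap (fun p => p.2.map (fun c => (p.1, c))) := by
    rw [List.foldl_map]
    simpa using PySem.List.foldl_append_eq_flatMap
      (fun x : Int × List Int => x.2.map (fun i => (x.1, i))) gpus []
  rw [hg]
  set L := gpus.flatMap (fun p => p.2.map (fun c => (p.1, c))) with hLdef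
  -- B's gpu count equals the length of A's flat slot list
  have hsum : (gpus.map (fun p => ((p.2.length : Nat) : Int))).sum = (L.length : Int) := by
    rw [hLdef, List.length_flatMap]
    simp [Function.comp_def]
  rw [hsum]
  -- A's machine-prefill loop is the literal dict of empty inner dicts
  have hdd0 : gpus.foldl (fun d p => d.insert p.1 PySem.Dict.empty) PySem.Dict.empty
      = (PySem.Dict.mk (gpus.map (fun p => (p.1, (PySem.Dict.empty : PySem.Dict Int (List String))))) : PvDD) := by
    apply PySem.Dict.ext
    rw [PySem.Dict.items_foldl_insert_fresh gpus (fun p => p.1) (fun _ => PySem.Dict.empty) _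
      (fun a _ => PySem.Dict.contains_empty _) hkeys]
    rfl
  rw [hdd0]
  set D0 := (PySem.Dict.mk (gpus.map (fun p => (p.1, (PySem.Dict.empty : PySem.Dict Int (List String))))) : PvDD) with hD0
  have hD0items : D0.items = gpus.map (fun p => (p.1, (PySem.Dict.empty : PySem.Dict Int (List String)))) := rfl
  have hD0nd : (D0.items.map Prod.fst).Nodup := by
    rw [hD0items, List.map_map]
    simpa [Function.comp] using hkeys
  congr 1
  have hnodupL : L.Nodup := pv_gpuslist_nodup gpus hkeys hcards
  have eB : (fun (q : PySem.Dict Int (List String) × Int) (c : Int) =>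
      if q.2 < (cs.length : Int) then
        (q.1.insert c (q.1.getD c [] ++ (PySem.List.slice? cs (some q.2) none (L.length : Int)).getD []), q.2 + 1)
      else (q.1, q.2 + 1)) = pvBInnerStep cs (L.length : Int) := rfl
  have eBO : (fun (st : PvDD × Int) (g : Int × List Int) =>
      (st.1.insert g.1 (g.2.foldl (pvBInnerStep cs (L.length : Int)) (PySem.Dict.empty, st.2)).1,
       (g.2.foldl (pvBInnerStep cs (L.length : Int)) (PySem.Dict.empty, st.2)).2))
      = pvBOuterStep cs (L.length : Int) := rfl
  by_cases hL : L = []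
  · -- no card anywhere: Pre_ forces configpathlist = [] and every machine keeps an empty dict
    have hcs : cs = [] := by
      by_contra hcs
      obtain ⟨p, hp, hpne⟩ := hcfg hcs
      obtain ⟨c, hc⟩ := List.exists_mem_of_ne_nil _ hpne
      have : (p.1, c) ∈ L := by
        rw [hLdef, List.mem_flatMap]
        exact ⟨p, hp, List.mem_map_of_mem hc⟩
      rw [hL] at this
      simp at this
    have hnil : ∀ g ∈ gpus, g.2 = [] := by
      intro g hgm
      by_contra hne
      obtain ⟨c, hc⟩ := List.exists_mem_of_ne_nil _ hne
      have : (g.1, c) ∈ L := by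
        rw [hLdef, List.mem_flatMap]
        exact ⟨g, hgm, List.mem_map_of_mem hc⟩
      rw [hL] at this
      simp at this
    subst hcs
    -- A's config loop is empty; B's per-card loops are all empty
    have hBfold : gpus.foldl (pvBOuterStep ([] : List String) (L.length : Int)) ((PySem.Dict.empty : PvDD), (0 : Int))
        = gpus.foldl (pvOuterStep ([] : List String) (L.length : Int) 0) ((PySem.Dict.empty : PvDD), (0 : Int)) := by
      apply PySem.List.foldl_congr_mem
      intro acc g hgm
      rw [pvBOuterStep, pvOuterStep, hnil g hgm]
      rfl
    rw [show (PySem.List.enumerate ([] : List String)).foldl _ D0 = D0 from rfl]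
    conv_rhs => rw [eB, eBO, hBfold]
    rw [pv_fold_items_fresh ([] : List String) (L.length : Int) 0 gpus PySem.Dict.empty 0 hkeys
        (fun g _ => PySem.Dict.contains_empty _),
      pv_rows_nil_cards _ _ _ gpus 0 hnil, hD0items]
    rfl
  · have hN : 0 < L.length := List.length_pos_iff.mpr hL
    have hN' : (0 : Int) < (L.length : Int) := by exact_mod_cast hN
    -- A side: round-robin fold = stride fold = outer fold over D0, with items pvRows
    have e1 : (fun (d : PvDD) (p : Int × String) =>
        d.modify (PySem.List.pyGetD L (PySem.Int.mod p.1 (L.length : Int)) (0, 0)).1 PySem.Dict.empty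
          (fun inner => inner.modify (PySem.List.pyGetD L (PySem.Int.mod p.1 (L.length : Int)) (0, 0)).2 []
            (fun l => l ++ [p.2]))) = pvStepA L (L.length : Int) := rfl
    rw [e1]
    have hmain := pv_main L cs hL hnodupL cs.length le_rfl D0
    rw [List.take_length] at hmain
    rw [hmain, pv_outer cs (L.length : Int) (cs.length : Int) gpus D0 0 hkeys
        (by rw [PySem.Dict.keys]; exact hD0nd)
        (by
          intro g hgm
          have hmem : (g.1, (PySem.Dict.empty : PySem.Dict Int (List String))) ∈ D0.items := by
            rw [hD0items]; exact List.mem_map_of_mem hgm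
          constructor
          · rw [PySem.Dict.contains_iff_mem_keys]
            exact List.mem_map_of_mem hmem
          · exact PySem.Dict.getD_of_mem_items D0 hmem (by rw [PySem.Dict.keys]; exact hD0nd) _),
      pv_fold_items_over cs (L.length : Int) (cs.length : Int) gpus [] D0 0 hD0items hD0nd]
    -- B side
    conv_rhs => rw [eB, eBO, pv_Bouter_eq cs (L.length : Int) hN' gpus PySem.Dict.empty 0 le_rfl]
    rw [pv_fold_items_fresh cs (L.length : Int) (cs.length : Int) gpus PySem.Dict.empty 0 hkeys
        (fun g _ => PySem.Dict.contains_empty _)]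
    rfl
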